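-- pv_equiv track=rewrite | github.com/pathanyawarkhan785/ywrPython | interview/split_in_2_words.py | splitTwo
-- ===== SOURCE A (Python) =====
-- def splitTwo(newStr):
--
--     newStr = newStr.split()
--     newList = []
--
--     for i in range(0, len(newStr)):
--         if i % 2 == 0:
--             newList.append(newStr[i + 1])
--         else:
--             newList.append(newStr[i - 1])
--
--     return " ".join(newList)
-- ===== SOURCE B (Python) =====
-- def splitTwo(newStr):
--     def swap(ws):
--         if not ws:
--             return []
--         return [ws[1], ws[0]] + swap(ws[2:])
--     return " ".join(swap(newStr.split()))
-- ===== Notes on version B (the rewrite author's own statement) =====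
-- stated objective: simpler
-- what changed: B replaces A's index loop with parity branch by a recursive helper that consumes the word list structurally: it swaps the first two words and recurses on the rest of the list (ws[2:]), never using a loop index or range at all.
import Mathlib
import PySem

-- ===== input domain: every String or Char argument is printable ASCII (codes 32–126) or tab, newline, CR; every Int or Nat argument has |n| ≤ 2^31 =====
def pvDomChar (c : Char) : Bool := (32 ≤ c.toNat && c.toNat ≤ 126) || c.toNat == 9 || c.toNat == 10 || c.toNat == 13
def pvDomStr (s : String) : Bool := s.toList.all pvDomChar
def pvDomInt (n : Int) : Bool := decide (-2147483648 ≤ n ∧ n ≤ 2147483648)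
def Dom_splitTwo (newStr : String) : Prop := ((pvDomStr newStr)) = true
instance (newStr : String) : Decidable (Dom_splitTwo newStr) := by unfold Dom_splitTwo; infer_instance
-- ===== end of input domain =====

-- B swaps adjacent words by structural recursion on the word list (swap first two, recurse on the rest), with no loop index (objective: simpler).

-- ===== PORT A =====
def splitTwo (newStr : String) : String :=
  let ws := PySem.Str.split₀ newStr
  let newList := (PySem.List.pyRange 0 (PySem.List.len ws) 1).foldl
    (fun acc i =>
      if PySem.Int.mod i 2 = 0 then acc ++ [PySem.List.pyGetD ws (i + 1) ""]
      else acc ++ [PySem.List.pyGetD ws (i - 1) ""]) []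
  PySem.Str.join " " newList

-- ===== PORT B =====
-- Source B's recursive helper `swap`: ws[1] / ws[0] are pyGetD (Pre_ keeps them in range), ws[2:] is slice.
def swapB : List String → List String
  | [] => []
  | a :: rest =>
      [PySem.List.pyGetD (a :: rest) 1 "", PySem.List.pyGetD (a :: rest) 0 ""]
        ++ swapB (PySem.List.slice (a :: rest) (some 2) none)
termination_by ws => ws.length
decreasing_by
  rw [show ((2:Int)) = ((2:Nat):Int) by norm_num, PySem.List.slice_from_natCast]
  simp

def splitTwo_alt (newStr : String) : String :=
  PySem.Str.join " " (swapB (PySem.Str.split₀ newStr))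

-- ===== PRECONDITION & SPEC =====
-- Pre_ excludes exactly the inputs with an odd number of whitespace-separated words, where the
-- Python A raises IndexError (words[i+1] past the end); B raises there too (ws[1] on the singleton tail).
def Pre_splitTwo (newStr : String) : Prop := (PySem.Str.split₀ newStr).length % 2 = 0
instance (newStr : String) : Decidable (Pre_splitTwo newStr) := by unfold Pre_splitTwo; infer_instance
def pvWitness_splitTwo : String := "a b"

def Spec_splitTwo (newStr : String) (out : String) : Prop := out = splitTwo_alt newStr
instance (newStr : String) (out : String) : Decidable (Spec_splitTwo newStr out) := by unfold Spec_splitTwo; infer_instance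

-- ===== CLAIM (what is proved, stated in full; the proofs are below) =====
def Claim_equal_splitTwo : Prop := ∀ (newStr : String), Dom_splitTwo newStr → Pre_splitTwo newStr → Spec_splitTwo newStr (splitTwo newStr)

-- ===== LEMMAS AND PROOFS =====

-- the value A's loop builds: adjacent pairs swapped
def swapPairs : List String → List String
  | a :: b :: t => b :: a :: swapPairs t
  | _ => []

lemma loopA (ws : List String) : ∀ (m k : Nat), k % 2 = 0 → k + 2 * m = ws.length → ∀ acc,
    (PySem.List.pyRange (k : Int) (ws.length : Int) 1).foldl
      (fun acc i =>
        if PySem.Int.mod i 2 = 0 then acc ++ [PySem.List.pyGetD ws (i + 1) ""]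
        else acc ++ [PySem.List.pyGetD ws (i - 1) ""]) acc
      = acc ++ swapPairs (ws.drop k) := by
  intro m
  induction m with
  | zero =>
    intro k hk hlen acc
    rw [PySem.List.pyRange_one_eq_nil (by omega)]
    have : ws.drop k = [] := by rw [List.drop_eq_nil_iff]; omega
    simp [this, swapPairs]
  | succ m ih =>
    intro k hk hlen acc
    have h1 : k < ws.length := by omega
    have h2 : k + 1 < ws.length := by omega
    rw [PySem.List.pyRange_one_cons (by exact_mod_cast h1),
        PySem.List.pyRange_one_cons (show (k : Int) + 1 < (ws.length : Int) by exact_mod_cast h2)]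
    simp only [List.foldl_cons]
    have hmk : PySem.Int.mod (k : Int) 2 = 0 := by
      rw [show ((2:Int)) = ((2:Nat):Int) by norm_num, PySem.Int.mod_natCast]; exact_mod_cast hk
    have hmk1 : PySem.Int.mod ((k : Int) + 1) 2 ≠ 0 := by
      rw [show ((k:Int) + 1) = (((k+1:Nat)):Int) by push_cast; ring,
          show ((2:Int)) = ((2:Nat):Int) by norm_num, PySem.Int.mod_natCast]
      have : (k + 1) % 2 = 1 := by omega
      simp [this]
    rw [if_pos hmk, if_neg hmk1]
    have e1 : PySem.List.pyGetD ws ((k : Int) + 1) "" = ws[k+1] := by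
      rw [show ((k:Int) + 1) = (((k+1:Nat)):Int) by push_cast; ring, PySem.List.pyGetD_natCast,
          List.getD_eq_getElem ws "" h2]
    have e0 : PySem.List.pyGetD ws ((k : Int) + 1 - 1) "" = ws[k] := by
      rw [show ((k:Int) + 1 - 1) = ((k:Nat):Int) by ring, PySem.List.pyGetD_natCast,
          List.getD_eq_getElem ws "" h1]
    rw [e1, e0,
        show ((k : Int) + 1 + 1) = (((k+2:Nat)):Int) by push_cast; ring,
        ih (k + 2) (by omega) (by omega)]
    rw [List.drop_eq_getElem_cons h1, List.drop_eq_getElem_cons h2]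
    simp [swapPairs]

-- on an even-length list, B's recursion produces exactly the swapped-pairs list
lemma swapB_even : ∀ (m : Nat) (ws : List String), ws.length = 2 * m → swapB ws = swapPairs ws := by
  intro m
  induction m with
  | zero =>
    intro ws h
    have : ws = [] := List.eq_nil_of_length_eq_zero (by omega)
    simp [this, swapB, swapPairs]
  | succ m ih =>
    intro ws h
    match ws, h with
    | a :: b :: t, h =>
      rw [swapB]
      rw [show ((2:Int)) = ((2:Nat):Int) by norm_num, PySem.List.slice_from_natCast]
      simp only [List.drop_succ_cons, List.drop_zero]
      rw [ih t (by simp at h; omega)]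
      simp [PySem.List.pyGetD, swapPairs]

-- ===== VERDICT (by name: the statement is the Claim_ definition above) =====
theorem splitTwo_spec : Claim_equal_splitTwo := by
  intro newStr _ hpre
  unfold Spec_splitTwo splitTwo splitTwo_alt
  set ws := PySem.Str.split₀ newStr with hws
  obtain ⟨m, hm⟩ : ∃ m, ws.length = 2 * m := ⟨ws.length / 2, by unfold Pre_splitTwo at hpre; rw [← hws] at hpre; omega⟩
  simp only [PySem.List.len_eq]
  have hA := loopA ws m 0 (by omega) (by omega) []
  rw [Nat.cast_zero] at hA
  rw [hA, swapB_even m ws hm]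
  simp
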